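-- pv_equiv track=rewrite | github.com/bz226/elle_codes | python_jax_model/elle_jax_model/mesh.py | _refresh_local_focus_nodes
-- ===== SOURCE A (Python) =====
-- from typing import Any
--
-- def _node_neighbors(flynns: list[dict[str, Any]]) -> dict[int, set[int]]:
--     neighbors: dict[int, set[int]] = {}
--     for flynn in flynns:
--         node_ids = flynn["node_ids"]
--         count = len(node_ids)
--         for index, node_id in enumerate(node_ids):
--             left = node_ids[index - 1]
--             right = node_ids[(index + 1) % count]
--             neighbors.setdefault(int(node_id), set()).update((int(left), int(right)))
--     return neighbors
--
-- def _refresh_local_focus_nodes(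
--     moved_node_id: int,
--     focus_nodes: set[int],
--     flynns: list[dict[str, Any]],
-- ) -> tuple[dict[int, set[int]], set[int]]:
--     node_neighbors = _node_neighbors(flynns)
--     refreshed_focus = {int(node_id) for node_id in focus_nodes if int(node_id) in node_neighbors}
--     if int(moved_node_id) in node_neighbors:
--         refreshed_focus.add(int(moved_node_id))
--         refreshed_focus.update(int(node_id) for node_id in node_neighbors[int(moved_node_id)])
--     return node_neighbors, refreshed_focus
-- ===== SOURCE B (Python) =====
-- from typing import Any
--
--
-- def _ring_neighbors(k: int, rings: list[list[int]]) -> set[int]: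
--     """All ring-neighbors of node k across every ring (full scan)."""
--     out: set[int] = set()
--     for ring in rings:
--         m = len(ring)
--         for i, n in enumerate(ring):
--             if n == k:
--                 out.add(ring[i - 1])
--                 out.add(ring[(i + 1) % m])
--     return out
--
--
-- def _refresh_local_focus_nodes(
--     moved_node_id: int,
--     focus_nodes: set[int],
--     flynns: list[dict[str, Any]],
-- ) -> tuple[dict[int, set[int]], set[int]]:
--     # Key-centric build: first the deduped key list, then one dict comprehension
--     # computing each key's full neighbor set by scanning the rings (no setdefault,
--     # no incremental dict mutation).
--     rings = [[int(n) for n in flynn["node_ids"]] for flynn in flynns]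
--     keys = list(dict.fromkeys(n for ring in rings for n in ring))
--     node_neighbors = {k: _ring_neighbors(k, rings) for k in keys}
--     refreshed_focus = {int(n) for n in focus_nodes if int(n) in node_neighbors}
--     if int(moved_node_id) in node_neighbors:
--         refreshed_focus.add(int(moved_node_id))
--         refreshed_focus.update(int(n) for n in node_neighbors[int(moved_node_id)])
--     return node_neighbors, refreshed_focus
-- ===== Notes on version B (the rewrite author's own statement) =====
-- stated objective: alternative
-- what changed: B inverts the build: instead of A's single streaming pass that mutates a dict with setdefault/update while walking every ring, B first computes the deduped key list (dict.fromkeys over all ring occurrences) and then builds the adjacency in one dict comprehension, computing each key's complete neighbor set by a full scan over the rings; the focus-refresh pass is unchanged.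
import Mathlib
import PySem

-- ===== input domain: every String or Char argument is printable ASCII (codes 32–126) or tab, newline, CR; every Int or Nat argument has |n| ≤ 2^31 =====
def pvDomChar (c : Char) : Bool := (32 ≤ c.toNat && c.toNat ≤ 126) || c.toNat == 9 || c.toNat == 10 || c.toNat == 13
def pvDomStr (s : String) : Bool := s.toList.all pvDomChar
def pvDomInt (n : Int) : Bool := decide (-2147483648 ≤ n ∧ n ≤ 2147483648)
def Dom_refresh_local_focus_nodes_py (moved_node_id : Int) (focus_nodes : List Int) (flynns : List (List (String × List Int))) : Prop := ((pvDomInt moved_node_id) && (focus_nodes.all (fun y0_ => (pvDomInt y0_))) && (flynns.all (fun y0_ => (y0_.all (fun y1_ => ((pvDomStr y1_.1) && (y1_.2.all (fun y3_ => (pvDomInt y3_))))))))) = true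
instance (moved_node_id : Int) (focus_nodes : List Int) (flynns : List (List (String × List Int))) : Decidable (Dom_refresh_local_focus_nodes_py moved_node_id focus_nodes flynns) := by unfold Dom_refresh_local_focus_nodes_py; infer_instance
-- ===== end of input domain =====

-- B builds the adjacency key-centrically (deduped key list, then one dict comprehension whose value is a full
-- scan over the rings per key) instead of A's single streaming pass mutating a dict with setdefault; objective: alternative.

-- ===== PORT A =====
-- _node_neighbors: nested loop, per node reads node_ids[index-1] and node_ids[(index+1) % count]
def pvNodeNeighborsA (flynns : List (List (String × List Int))) : PySem.Dict Int (PySem.Set Int) :=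
  flynns.foldl (fun neighbors flynn =>
    let node_ids := (PySem.Dict.mk flynn).getD "node_ids" []   -- flynn["node_ids"]; KeyError excluded by Pre_
    let count : Int := node_ids.length
    (PySem.List.enumerate node_ids).foldl (fun nbrs p =>
      -- left = node_ids[index-1]; right = node_ids[(index+1) % count]; both always in range inside the loop
      let left := PySem.List.pyGetD node_ids (p.1 - 1) 0
      let right := PySem.List.pyGetD node_ids (PySem.Int.mod (p.1 + 1) count) 0
      -- neighbors.setdefault(int(node_id), set()).update((int(left), int(right)))  =  d[k] = d.get(k, set()) ∪ {l, r}
      nbrs.modify p.2 PySem.Set.empty (fun s => PySem.Set.update s [left, right])) neighbors) PySem.Dict.empty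

def refresh_local_focus_nodes_py (moved_node_id : Int) (focus_nodes : List Int) (flynns : List (List (String × List Int))) : (List (Int × List Int)) × List Int :=
  let node_neighbors := pvNodeNeighborsA flynns
  -- {int(node_id) for node_id in focus_nodes if int(node_id) in node_neighbors}
  let refreshed_focus : PySem.Set Int :=
    focus_nodes.foldl (fun s n => if node_neighbors.contains n then PySem.Set.add s n else s) PySem.Set.empty
  let refreshed_focus :=
    if node_neighbors.contains moved_node_id then
      PySem.Set.update (PySem.Set.add refreshed_focus moved_node_id) (node_neighbors.getD moved_node_id PySem.Set.empty)
    else refreshed_focus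
  (node_neighbors.items, refreshed_focus)

-- ===== PORT B =====
-- _ring_neighbors: full scan over all rings collecting the ring-neighbors of one key k
def pvRingNeighbors (k : Int) (rings : List (List Int)) : PySem.Set Int :=
  rings.foldl (fun out ring =>
    (PySem.List.enumerate ring).foldl (fun out p =>
      if p.2 == k then
        PySem.Set.add (PySem.Set.add out (PySem.List.pyGetD ring (p.1 - 1) 0))
          (PySem.List.pyGetD ring (PySem.Int.mod (p.1 + 1) (ring.length : Int)) 0)
      else out) out) PySem.Set.empty

def refresh_local_focus_nodes_py_alt (moved_node_id : Int) (focus_nodes : List Int) (flynns : List (List (String × List Int))) : (List (Int × List Int)) × List Int :=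
  -- rings = [[int(n) for n in flynn["node_ids"]] for flynn in flynns]   (int() is identity on Int)
  let rings := flynns.map (fun flynn => (PySem.Dict.mk flynn).getD "node_ids" [])
  -- keys = list(dict.fromkeys(n for ring in rings for n in ring))
  let keys := PySem.List.dedup (rings.flatMap (fun ring => ring))
  -- node_neighbors = {k: _ring_neighbors(k, rings) for k in keys}   (keys are distinct, in order)
  let node_neighbors := PySem.Dict.mk (keys.map (fun k => (k, pvRingNeighbors k rings)))
  let refreshed_focus : PySem.Set Int :=
    focus_nodes.foldl (fun s n => if node_neighbors.contains n then PySem.Set.add s n else s) PySem.Set.empty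
  let refreshed_focus :=
    if node_neighbors.contains moved_node_id then
      PySem.Set.update (PySem.Set.add refreshed_focus moved_node_id) (node_neighbors.getD moved_node_id PySem.Set.empty)
    else refreshed_focus
  (node_neighbors.items, refreshed_focus)

-- ===== PRECONDITION & SPEC =====
-- Pre_ excludes exactly the flynns missing the "node_ids" key, on which Python A raises KeyError.
def Pre_refresh_local_focus_nodes_py (moved_node_id : Int) (focus_nodes : List Int) (flynns : List (List (String × List Int))) : Prop :=
  (flynns.all (fun flynn => flynn.any (fun p => p.1 == "node_ids"))) = true
instance (moved_node_id : Int) (focus_nodes : List Int) (flynns : List (List (String × List Int))) : Decidable (Pre_refresh_local_focus_nodes_py moved_node_id focus_nodes flynns) := by unfold Pre_refresh_local_focus_nodes_py; infer_instance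
def pvWitness_refresh_local_focus_nodes_py : Int × List Int × (List (List (String × List Int))) :=
  (2, [1, 5], [[("node_ids", [1, 2, 3])], [("node_ids", [3, 4])]])
def Spec_refresh_local_focus_nodes_py (moved_node_id : Int) (focus_nodes : List Int) (flynns : List (List (String × List Int))) (out : (List (Int × List Int)) × List Int) : Prop := out = refresh_local_focus_nodes_py_alt moved_node_id focus_nodes flynns
instance (moved_node_id : Int) (focus_nodes : List Int) (flynns : List (List (String × List Int))) (out : (List (Int × List Int)) × List Int) : Decidable (Spec_refresh_local_focus_nodes_py moved_node_id focus_nodes flynns out) := by unfold Spec_refresh_local_focus_nodes_py; infer_instance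

-- ===== CLAIM (what is proved, stated in full; the proofs are below) =====
def Claim_equal_refresh_local_focus_nodes_py : Prop := ∀ (moved_node_id : Int) (focus_nodes : List Int) (flynns : List (List (String × List Int))), Dom_refresh_local_focus_nodes_py moved_node_id focus_nodes flynns → Pre_refresh_local_focus_nodes_py moved_node_id focus_nodes flynns → Spec_refresh_local_focus_nodes_py moved_node_id focus_nodes flynns (refresh_local_focus_nodes_py moved_node_id focus_nodes flynns)

-- ===== LEMMAS AND PROOFS =====

-- proof-side edge stream: the (node, neighbor) pairs A's inner loop touches, per ring and overall
def pvPairsOf (ring : List Int) : List (Int × Int) :=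
  (PySem.List.enumerate ring).flatMap (fun p =>
    [(p.2, PySem.List.pyGetD ring (p.1 - 1) 0),
     (p.2, PySem.List.pyGetD ring (PySem.Int.mod (p.1 + 1) (ring.length : Int)) 0)])

def pvStep (d : PySem.Dict Int (PySem.Set Int)) (p : Int × Int) : PySem.Dict Int (PySem.Set Int) :=
  d.modify p.1 PySem.Set.empty (fun s => PySem.Set.add s p.2)

theorem pv_add_add (s : PySem.Set Int) (x : Int) : (s.add x).add x = s.add x := by
  simp [PySem.Set.add]; split <;> simp_all

theorem pv_modify_pair (d : PySem.Dict Int (PySem.Set Int)) (k l r : Int) :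
    (d.modify k PySem.Set.empty (fun s => PySem.Set.add s l)).modify k PySem.Set.empty (fun s => PySem.Set.add s r)
      = d.modify k PySem.Set.empty (fun s => PySem.Set.update s [l, r]) := by
  simp [PySem.Dict.modify, PySem.Dict.getD_insert_self, PySem.Dict.insert_insert_self, PySem.Set.update]

-- A's dict is the fold of pvStep over the flattened edge stream
theorem pv_A_eq_stream_fold (flynns : List (List (String × List Int))) :
    pvNodeNeighborsA flynns
      = ((flynns.map (fun flynn => (PySem.Dict.mk flynn).getD "node_ids" [])).flatMap pvPairsOf).foldl
          pvStep PySem.Dict.empty := by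
  unfold pvNodeNeighborsA
  rw [List.foldl_flatMap, List.foldl_map]
  apply PySem.List.foldl_congr_mem
  intro acc flynn _
  unfold pvPairsOf
  rw [List.foldl_flatMap]
  apply PySem.List.foldl_congr_mem
  intro d p _
  simp only [List.foldl_cons, List.foldl_nil, pvStep]
  exact (pv_modify_pair d p.2 _ _).symm

-- lookup in the stream fold = ordered set of the pair targets whose source is c
theorem pv_getD_stream_fold (l : List (Int × Int)) (d : PySem.Dict Int (PySem.Set Int)) (c : Int) :
    (l.foldl pvStep d).getD c PySem.Set.empty
      = PySem.Set.update (d.getD c PySem.Set.empty) ((l.filter (fun q => q.1 == c)).map (·.2)) := by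
  induction l generalizing d with
  | nil => simp [PySem.Set.update]
  | cons p t ih =>
    simp only [List.foldl_cons, ih, List.filter_cons]
    by_cases h : p.1 = c
    · simp [pvStep, h, PySem.Set.update]
    · have hb : (p.1 == c) = false := by simp [h]
      simp only [pvStep, PySem.Dict.getD_modify, hb, Bool.false_eq_true, if_false]
      rw [if_neg (Ne.symm h)]

-- folding Set.add over a node-doubled stream is folding it over the nodes
theorem pv_foldl_add_pairs_fst (ring : List Int) (s : PySem.Set Int) :
    List.foldl PySem.Set.add s ((pvPairsOf ring).map (·.1)) = List.foldl PySem.Set.add s ring := by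
  unfold pvPairsOf
  rw [List.map_flatMap, List.foldl_flatMap]
  simp only [List.map_cons, List.map_nil, List.foldl_cons, List.foldl_nil]
  calc (PySem.List.enumerate ring).foldl (fun s p => (s.add p.2).add p.2) s
      = (PySem.List.enumerate ring).foldl (fun s p => s.add p.2) s := by
        apply PySem.List.foldl_congr_mem; intro s p _; exact pv_add_add s p.2
    _ = ((PySem.List.enumerate ring).map (·.2)).foldl PySem.Set.add s := by rw [List.foldl_map]
    _ = List.foldl PySem.Set.add s ring := by rw [PySem.List.map_snd_enumerate ring 0]

-- keys of A's dict = deduped occurrence list, in first-appearance order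
theorem pv_keys_eq (rings : List (List Int)) :
    ((rings.flatMap pvPairsOf).foldl pvStep PySem.Dict.empty).keys
      = PySem.List.dedup (rings.flatMap (fun ring => ring)) := by
  have hk : ((rings.flatMap pvPairsOf).foldl pvStep PySem.Dict.empty).keys
      = PySem.Set.update (PySem.Dict.empty : PySem.Dict Int (PySem.Set Int)).keys
          ((rings.flatMap pvPairsOf).map (fun p : Int × Int => p.1)) :=
    PySem.Dict.keys_foldl_modify_key (rings.flatMap pvPairsOf) (fun p : Int × Int => p.1)
      PySem.Set.empty (fun _ p => fun s => PySem.Set.add s p.2) PySem.Dict.empty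
  rw [hk]
  simp only [PySem.List.dedup_eq_ofList, PySem.Dict.keys_empty]
  show PySem.Set.update ([] : PySem.Set Int) _ = _
  rw [PySem.Set.update, PySem.Set.ofList_eq_foldl]
  rw [List.map_flatMap, List.foldl_flatMap, List.foldl_flatMap]
  apply PySem.List.foldl_congr_mem
  intro s ring _
  exact pv_foldl_add_pairs_fst ring s

-- B's conditional two-add scan over one ring = folding Set.add over that ring's filtered pair targets
theorem pv_ring_scan_eq (k : Int) (ring : List Int) (l : List (Int × Int)) (out : PySem.Set Int) :
    l.foldl (fun out p =>
        if p.2 == k then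
          PySem.Set.add (PySem.Set.add out (PySem.List.pyGetD ring (p.1 - 1) 0))
            (PySem.List.pyGetD ring (PySem.Int.mod (p.1 + 1) (ring.length : Int)) 0)
        else out) out
      = List.foldl PySem.Set.add out
          (((l.flatMap (fun p =>
              [(p.2, PySem.List.pyGetD ring (p.1 - 1) 0),
               (p.2, PySem.List.pyGetD ring (PySem.Int.mod (p.1 + 1) (ring.length : Int)) 0)])).filter
            (fun q => q.1 == k)).map (·.2)) := by
  induction l generalizing out with
  | nil => rfl
  | cons p t ih =>
    simp only [List.foldl_cons, List.flatMap_cons, List.filter_append, List.map_append,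
      List.foldl_append, List.filter_cons, List.filter_nil]
    by_cases h : (p.2 == k) = true
    · simp only [h, if_true, List.map_cons, List.map_nil, List.foldl_cons, List.foldl_nil]
      exact ih _
    · have hb : (p.2 == k) = false := by simpa using h
      simp only [hb, Bool.false_eq_true, if_false, List.map_nil, List.foldl_nil]
      exact ih _

-- B's per-key value = lookup in A's stream fold
theorem pv_ringNeighbors_eq (k : Int) (rings : List (List Int)) :
    pvRingNeighbors k rings
      = PySem.Set.update PySem.Set.empty
          (((rings.flatMap pvPairsOf).filter (fun q => q.1 == k)).map (·.2)) := by
  unfold pvRingNeighbors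
  rw [PySem.Set.update]
  rw [List.filter_flatMap, List.map_flatMap, List.foldl_flatMap]
  apply PySem.List.foldl_congr_mem
  intro out ring _
  simpa only [pvPairsOf] using pv_ring_scan_eq k ring (PySem.List.enumerate ring) out

-- the two adjacency dicts are equal
theorem pv_dict_eq (flynns : List (List (String × List Int))) :
    pvNodeNeighborsA flynns
      = PySem.Dict.mk ((PySem.List.dedup
          ((flynns.map (fun flynn => (PySem.Dict.mk flynn).getD "node_ids" [])).flatMap (fun ring => ring))).map
          (fun k => (k, pvRingNeighbors k (flynns.map (fun flynn => (PySem.Dict.mk flynn).getD "node_ids" []))))) := by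
  set rings := flynns.map (fun flynn => (PySem.Dict.mk flynn).getD "node_ids" []) with hrings
  rw [pv_A_eq_stream_fold, ← hrings]
  apply PySem.Dict.ext
  have hnd : ((rings.flatMap pvPairsOf).foldl pvStep PySem.Dict.empty).keys.Nodup :=
    PySem.Dict.nodup_keys_foldl_modify_key (rings.flatMap pvPairsOf)
      (fun p : Int × Int => p.1) PySem.Set.empty (fun _ p => fun s => PySem.Set.add s p.2)
      PySem.Dict.empty (by simp)
  rw [PySem.Dict.items_eq_map_keys _ hnd PySem.Set.empty, pv_keys_eq]
  show _ = List.map (fun k => (k, pvRingNeighbors k rings)) (PySem.List.dedup (rings.flatMap (fun ring => ring)))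
  apply List.map_congr_left
  intro k _
  rw [pv_getD_stream_fold, pv_ringNeighbors_eq]
  rfl

-- ===== VERDICT (by name: the statement is the Claim_ definition above) =====
theorem refresh_local_focus_nodes_py_spec : Claim_equal_refresh_local_focus_nodes_py := by
  intro moved_node_id focus_nodes flynns _ _
  unfold Spec_refresh_local_focus_nodes_py refresh_local_focus_nodes_py refresh_local_focus_nodes_py_alt
  rw [pv_dict_eq]
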